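-- pv_equiv track=rewrite | github.com/AnaAtanasova/ai-tetris | tpg-tetris-ia_105625_105635_105648-main/student.py | get_heights
-- ===== SOURCE A (Python) =====
-- def get_heights(game):
--     heights=[]
--     for i in range(1,9):
--         max_height=30
--         for position in game:
--             if position[0]==i:
--                 if position[1]<max_height:
--                     max_height=position[1]
--         heights.append(30-max_height)
--
--
--     return heights
-- ===== SOURCE B (Python) =====
-- def get_heights(game):
--     mins = [30] * 8
--     for x, y in game:
--         if 1 <= x <= 8 and y < mins[x - 1]:
--             mins[x - 1] = y
--     return [30 - m for m in mins]
-- ===== Notes on version B (the rewrite author's own statement) =====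
-- stated objective: faster
-- what changed: Replaces the eight separate per-column scans of the board with one single pass that maintains an 8-entry per-column minimum table, then emits the heights from the table.
import Mathlib
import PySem

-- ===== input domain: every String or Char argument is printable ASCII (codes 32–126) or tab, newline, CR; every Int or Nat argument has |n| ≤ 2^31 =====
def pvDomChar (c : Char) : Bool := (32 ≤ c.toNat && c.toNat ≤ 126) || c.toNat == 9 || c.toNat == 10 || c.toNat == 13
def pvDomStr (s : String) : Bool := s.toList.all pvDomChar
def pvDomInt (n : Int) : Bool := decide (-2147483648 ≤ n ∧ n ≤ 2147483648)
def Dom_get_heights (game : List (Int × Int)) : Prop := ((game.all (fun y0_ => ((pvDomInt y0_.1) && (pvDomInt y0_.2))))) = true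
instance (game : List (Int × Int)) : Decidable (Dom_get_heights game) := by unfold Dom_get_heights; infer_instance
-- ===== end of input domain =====

-- B replaces A's eight per-column scans with one pass over the board that maintains an
-- 8-entry per-column minimum table; same return value; one pass instead of eight.

-- ===== PORT A =====
-- inner loop of A for a fixed column i: min of position[1] over positions with position[0]==i, starting at 30
def pvInnerA (i : Int) (game : List (Int × Int)) : Int :=
  game.foldl (fun m p => if p.1 = i then (if p.2 < m then p.2 else m) else m) 30

def get_heights (game : List (Int × Int)) : List Int :=
  (PySem.List.pyRange 1 9 1).foldl (fun hs i => hs ++ [30 - pvInnerA i game]) []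

-- ===== PORT B =====
-- one step of B's single pass: update the per-column minimum table at column p.1
def pvStepB (mins : List Int) (p : Int × Int) : List Int :=
  if 1 ≤ p.1 ∧ p.1 ≤ 8 ∧ p.2 < mins.getD (p.1 - 1).toNat 30 then
    mins.set (p.1 - 1).toNat p.2
  else mins

def get_heights_alt (game : List (Int × Int)) : List Int :=
  (game.foldl pvStepB (List.replicate 8 30)).map (fun m => 30 - m)

-- ===== PRECONDITION & SPEC =====
def Spec_get_heights (game : List (Int × Int)) (out : List Int) : Prop := out = get_heights_alt game
instance (game : List (Int × Int)) (out : List Int) : Decidable (Spec_get_heights game out) := by unfold Spec_get_heights; infer_instance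

-- ===== CLAIM (what is proved, stated in full; the proofs are below) =====
def Claim_equal_get_heights : Prop := ∀ (game : List (Int × Int)), Dom_get_heights game → Spec_get_heights game (get_heights game)

-- ===== LEMMAS AND PROOFS =====

theorem pvStepB_length (mins : List Int) (p : Int × Int) : (pvStepB mins p).length = mins.length := by
  unfold pvStepB; split <;> simp

theorem pvFold_length (game : List (Int × Int)) (mins : List Int) :
    (game.foldl pvStepB mins).length = mins.length := by
  induction game generalizing mins with
  | nil => rfl
  | cons p t ih => simpa [List.foldl, pvStepB_length] using ih (pvStepB mins p)

-- invariant of B's single pass: entry j of the table is the per-column minimum that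
-- A's inner scan for column j+1 computes (started from the table's current entry)
theorem pvInv (game : List (Int × Int)) (mins : List Int) (j : ℕ)
    (hlen : mins.length = 8) (hj : j < 8) :
    (game.foldl pvStepB mins).getD j 0 =
      game.foldl (fun m p => if p.1 = ((j : Int) + 1) ∧ p.2 < m then p.2 else m) (mins.getD j 0) := by
  induction game generalizing mins with
  | nil => rfl
  | cons p t ih =>
    simp only [List.foldl]
    have hjl : j < mins.length := by omega
    have hget30 : mins.getD j 30 = mins.getD j 0 := by
      rw [List.getD_eq_getElem _ _ hjl, List.getD_eq_getElem _ _ hjl]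
    have hstep : (pvStepB mins p).getD j 0 =
        if p.1 = ((j : Int) + 1) ∧ p.2 < mins.getD j 0 then p.2 else mins.getD j 0 := by
      unfold pvStepB
      by_cases hc : p.1 = ((j : Int) + 1)
      · have hAidx : (p.1 - 1).toNat = j := by omega
        have h1 : (1 : Int) ≤ p.1 := by omega
        have h8 : p.1 ≤ 8 := by omega
        rw [hAidx, hget30]
        by_cases hlt : p.2 < mins.getD j 0
        · rw [if_pos ⟨h1, h8, hlt⟩, if_pos ⟨hc, hlt⟩,
            List.getD_eq_getElem _ _ (by simpa using hjl)]
          simp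
        · rw [if_neg (fun hg => hlt hg.2.2), if_neg (fun hg => hlt hg.2)]
      · rw [if_neg (show ¬(p.1 = ((j : Int) + 1) ∧ p.2 < mins.getD j 0) from fun hg => hc hg.1)]
        split
        · rename_i hg
          have hne : (p.1 - 1).toNat ≠ j := by omega
          rw [List.getD_eq_getElem _ _ (by simpa using hjl),
            List.getD_eq_getElem _ _ hjl, List.getElem_set_ne hne]
        · rfl
    rw [ih (pvStepB mins p) (by rw [pvStepB_length, hlen]), hstep]

-- the two per-column update rules are the same function
theorem pvFunEq (c : Int) :
    (fun (m : Int) (p : Int × Int) => if p.1 = c ∧ p.2 < m then p.2 else m)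
      = (fun m p => if p.1 = c then (if p.2 < m then p.2 else m) else m) := by
  funext m p
  by_cases h : p.1 = c <;> by_cases h2 : p.2 < m <;> simp [h, h2]

theorem pvColumn (game : List (Int × Int)) (j : ℕ) (hj : j < 8) :
    (game.foldl pvStepB (List.replicate 8 30)).getD j 0 = pvInnerA ((j : Int) + 1) game := by
  rw [pvInv game _ j (by simp) hj]
  have hrep : (List.replicate 8 (30 : Int)).getD j 0 = 30 := by
    rw [List.getD_eq_getElem _ _ (by simpa using hj), List.getElem_replicate]
  rw [hrep, pvFunEq]
  rfl

-- ===== VERDICT (by name: the statement is the Claim_ definition above) =====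
theorem get_heights_spec : Claim_equal_get_heights := by
  intro game _
  unfold Spec_get_heights get_heights get_heights_alt
  have hr : PySem.List.pyRange 1 9 1 = [1, 2, 3, 4, 5, 6, 7, 8] := by decide
  rw [hr]
  have hlen : (game.foldl pvStepB (List.replicate 8 30)).length = 8 := by
    simp [pvFold_length]
  set L := game.foldl pvStepB (List.replicate 8 30) with hL
  match L, hlen with
  | [a, b, c, d, e, f, g, h], _ =>
    simp only [List.foldl, List.map, List.nil_append, List.cons_append]
    have hc := fun (j : ℕ) (hj : j < 8) => pvColumn game j hj
    have h0 := hc 0 (by omega); have h1 := hc 1 (by omega)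
    have h2 := hc 2 (by omega); have h3 := hc 3 (by omega)
    have h4 := hc 4 (by omega); have h5 := hc 5 (by omega)
    have h6 := hc 6 (by omega); have h7 := hc 7 (by omega)
    rw [← hL] at h0 h1 h2 h3 h4 h5 h6 h7
    simp only [List.getD] at h0 h1 h2 h3 h4 h5 h6 h7
    norm_num at h0 h1 h2 h3 h4 h5 h6 h7 ⊢
    simp [h0, h1, h2, h3, h4, h5, h6, h7]
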